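-- pv_equiv track=rewrite | github.com/Kukojaka/training | Sweet_date_of_working_lovebirds_2.py | sweet_date
-- ===== SOURCE A (Python) =====
-- def sweet_date(w1, r1, w2, r2, time_period):
--     sweet_dates = 0
--
--     for day in range(time_period):
--         john_resting = day % (w1 + r1) >= w1
--         anne_resting = day % (w2 + r2) >= w2
--
--         if john_resting and anne_resting:
--             sweet_dates += 1
--
--     return sweet_dates
-- ===== SOURCE B (Python) =====
-- def sweet_date(w1, r1, w2, r2, time_period):
--     if time_period <= 0:
--         return 0
--     p1 = w1 + r1
--     p2 = w2 + r2
--     g = _gcd(abs(p1), abs(p2))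
--     period = (abs(p1) * abs(p2)) // g  # lcm of the two cycle lengths
--     n = time_period
--     if period <= n:
--         per = _hits(w1, p1, w2, p2, period)
--         return (n // period) * per + _hits(w1, p1, w2, p2, n % period)
--     return _hits(w1, p1, w2, p2, n)
--
-- def _gcd(a, b):
--     while b:
--         a, b = b, a % b
--     return a
--
-- def _hits(w1, p1, w2, p2, m):
--     c = 0
--     for d in range(m):
--         if d % p1 >= w1 and d % p2 >= w2:
--             c += 1
--     return c
-- ===== Notes on version B (the rewrite author's own statement) =====
-- stated objective: faster
-- what changed: Instead of scanning every day in [0, time_period), B counts the rest-overlap days inside one lcm(w1+r1, w2+r2) cycle, multiplies by the number of whole cycles, and scans only the remainder.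
import Mathlib
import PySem

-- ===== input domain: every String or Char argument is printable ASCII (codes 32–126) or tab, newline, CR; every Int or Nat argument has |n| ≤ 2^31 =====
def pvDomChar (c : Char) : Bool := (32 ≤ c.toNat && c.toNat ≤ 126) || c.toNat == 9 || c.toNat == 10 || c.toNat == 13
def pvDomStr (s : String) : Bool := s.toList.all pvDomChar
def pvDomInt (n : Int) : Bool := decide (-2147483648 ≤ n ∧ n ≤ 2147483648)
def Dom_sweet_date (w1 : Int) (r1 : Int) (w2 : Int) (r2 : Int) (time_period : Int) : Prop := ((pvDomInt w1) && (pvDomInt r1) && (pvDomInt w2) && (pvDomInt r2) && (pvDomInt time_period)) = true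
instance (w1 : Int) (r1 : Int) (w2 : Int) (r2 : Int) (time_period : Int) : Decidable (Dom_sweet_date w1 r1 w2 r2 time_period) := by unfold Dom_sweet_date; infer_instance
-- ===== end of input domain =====

-- B counts rest-overlap days inside one lcm(w1+r1, w2+r2) cycle and multiplies by whole
-- cycles plus a remainder scan, instead of A's day-by-day scan of the whole time period (faster).


-- ===== PORT A =====
def sweet_date (w1 : Int) (r1 : Int) (w2 : Int) (r2 : Int) (time_period : Int) : Int :=
  (PySem.List.pyRange 0 time_period 1).foldl
    (fun sweet_dates day =>
      let john_resting := PySem.Int.mod day (w1 + r1) ≥ w1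
      let anne_resting := PySem.Int.mod day (w2 + r2) ≥ w2
      if john_resting ∧ anne_resting then sweet_dates + 1 else sweet_dates) 0

-- ===== PORT B =====
-- Source B's _gcd: while b: a, b = b, a % b; return a   (called on nonnegative arguments)
def pvGcdLoop (a : Nat) (b : Nat) : Nat :=
  if h : b = 0 then a else pvGcdLoop b (a % b)
termination_by b
decreasing_by exact Nat.mod_lt _ (Nat.pos_of_ne_zero h)

-- Source B's _hits: count d in range(m) with d % p1 >= w1 and d % p2 >= w2
def pvHits (w1 : Int) (p1 : Int) (w2 : Int) (p2 : Int) (m : Int) : Int :=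
  (PySem.List.pyRange 0 m 1).foldl
    (fun c d => if PySem.Int.mod d p1 ≥ w1 ∧ PySem.Int.mod d p2 ≥ w2 then c + 1 else c) 0

def sweet_date_alt (w1 : Int) (r1 : Int) (w2 : Int) (r2 : Int) (time_period : Int) : Int :=
  if time_period ≤ 0 then 0
  else
    let p1 := w1 + r1
    let p2 := w2 + r2
    let g := pvGcdLoop p1.natAbs p2.natAbs
    let period := PySem.Int.floordiv ((p1.natAbs : Int) * (p2.natAbs : Int)) (g : Int)
    let n := time_period
    if period ≤ n then
      PySem.Int.floordiv n period * pvHits w1 p1 w2 p2 period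
        + pvHits w1 p1 w2 p2 (PySem.Int.mod n period)
    else pvHits w1 p1 w2 p2 n

-- ===== PRECONDITION & SPEC =====
-- A raises ZeroDivisionError iff time_period > 0 and w1+r1 = 0 or w2+r2 = 0; Pre_ excludes exactly those inputs.
def Pre_sweet_date (w1 : Int) (r1 : Int) (w2 : Int) (r2 : Int) (time_period : Int) : Prop :=
  (w1 + r1 ≠ 0 ∧ w2 + r2 ≠ 0) ∨ time_period ≤ 0
instance (w1 : Int) (r1 : Int) (w2 : Int) (r2 : Int) (time_period : Int) : Decidable (Pre_sweet_date w1 r1 w2 r2 time_period) := by unfold Pre_sweet_date; infer_instance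
def pvWitness_sweet_date : Int × Int × Int × Int × Int := (2, 2, 3, 3, 10)

def Spec_sweet_date (w1 : Int) (r1 : Int) (w2 : Int) (r2 : Int) (time_period : Int) (out : Int) : Prop := out = sweet_date_alt w1 r1 w2 r2 time_period
instance (w1 : Int) (r1 : Int) (w2 : Int) (r2 : Int) (time_period : Int) (out : Int) : Decidable (Spec_sweet_date w1 r1 w2 r2 time_period out) := by unfold Spec_sweet_date; infer_instance

-- ===== CLAIM (what is proved, stated in full; the proofs are below) =====
def Claim_equal_sweet_date : Prop := ∀ (w1 : Int) (r1 : Int) (w2 : Int) (r2 : Int) (time_period : Int), Dom_sweet_date w1 r1 w2 r2 time_period → Pre_sweet_date w1 r1 w2 r2 time_period → Spec_sweet_date w1 r1 w2 r2 time_period (sweet_date w1 r1 w2 r2 time_period)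

-- ===== LEMMAS AND PROOFS =====

-- the day predicate, and the Nat-indexed count of hit days in [0, k)
def pvQ (w1 p1 w2 p2 : Int) (d : Int) : Bool :=
  decide (PySem.Int.mod d p1 ≥ w1 ∧ PySem.Int.mod d p2 ≥ w2)

def pvCnt (w1 p1 w2 p2 : Int) (k : Nat) : Nat :=
  (List.range k).countP (fun i => pvQ w1 p1 w2 p2 (Int.ofNat i))

lemma pvGcdLoop_eq_gcd (a b : Nat) : pvGcdLoop a b = Nat.gcd a b := by
  induction b using Nat.strong_induction_on generalizing a with
  | _ b ih =>
    rw [pvGcdLoop]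
    by_cases h : b = 0
    · simp [h]
    · rw [dif_neg h, ih (a % b) (Nat.mod_lt _ (Nat.pos_of_ne_zero h)) b,
        Nat.gcd_comm b, ← Nat.gcd_rec b a, Nat.gcd_comm b a]

lemma pvHits_eq_cnt (w1 p1 w2 p2 m : Int) :
    pvHits w1 p1 w2 p2 m = (pvCnt w1 p1 w2 p2 m.toNat : Int) := by
  rw [pvHits, PySem.List.foldl_ite_add_one, PySem.List.pyRange_one]
  unfold pvCnt pvQ
  rw [List.countP_map]
  simp only [Int.sub_zero, Function.comp_def, zero_add, ge_iff_le, Int.ofNat_eq_natCast]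

lemma sweet_date_eq_cnt (w1 r1 w2 r2 tp : Int) :
    sweet_date w1 r1 w2 r2 tp = (pvCnt w1 (w1 + r1) w2 (w2 + r2) tp.toNat : Int) := by
  rw [sweet_date, PySem.List.foldl_ite_add_one, PySem.List.pyRange_one]
  unfold pvCnt pvQ
  rw [List.countP_map]
  simp only [Int.sub_zero, Function.comp_def, zero_add, ge_iff_le, Int.ofNat_eq_natCast]

lemma fmod_add_of_dvd (d p L : Int) (h : p ∣ L) : (d + L).fmod p = d.fmod p := by
  obtain ⟨c, rfl⟩ := h
  exact Int.add_mul_fmod_self_left d p c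

-- the day predicate is periodic with any common multiple of the two cycle lengths
lemma pvQ_period (w1 p1 w2 p2 L : Int) (h1 : p1 ∣ L) (h2 : p2 ∣ L) (d : Int) :
    pvQ w1 p1 w2 p2 (d + L) = pvQ w1 p1 w2 p2 d := by
  unfold pvQ PySem.Int.mod
  rw [fmod_add_of_dvd _ _ _ h1, fmod_add_of_dvd _ _ _ h2]

-- splitting a periodic count into whole periods plus a remainder
lemma countP_period (q : Nat → Bool) (L : Nat) (hL : 0 < L)
    (hq : ∀ i, q (L + i) = q i) (k : Nat) :
    (List.range k).countP q = k / L * (List.range L).countP q + (List.range (k % L)).countP q := by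
  induction k using Nat.strong_induction_on with
  | _ k ih =>
    by_cases h : k < L
    · rw [Nat.div_eq_of_lt h, Nat.mod_eq_of_lt h]; ring
    · obtain ⟨m, rfl⟩ : ∃ m, k = L + m := ⟨k - L, by omega⟩
      rw [List.range_add, List.countP_append, List.countP_map]
      have hmap : (q ∘ fun i => L + i) = q := funext hq
      rw [hmap, ih m (by omega)]
      have hd : (L + m) / L = m / L + 1 := by rw [Nat.add_comm, Nat.add_div_right _ hL]
      have hm : (L + m) % L = m % L := by rw [Nat.add_comm, Nat.add_mod_right]
      rw [hd, hm]; ring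

theorem sweet_date_spec : Claim_equal_sweet_date := by
  intro w1 r1 w2 r2 tp _ hpre
  unfold Spec_sweet_date sweet_date_alt
  by_cases htp : tp ≤ 0
  · rw [if_pos htp, sweet_date_eq_cnt]
    have : tp.toNat = 0 := Int.toNat_of_nonpos htp
    simp [this, pvCnt]
  · rw [if_neg htp]
    simp only []
    have htp' : 0 < tp := by omega
    obtain ⟨hp1, hp2⟩ : w1 + r1 ≠ 0 ∧ w2 + r2 ≠ 0 := hpre.resolve_right htp
    set p1 := w1 + r1 with hp1def
    set p2 := w2 + r2 with hp2def
    set a := p1.natAbs with hadef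
    set b := p2.natAbs with hbdef
    set L := Nat.lcm a b with hLdef
    have hper : PySem.Int.floordiv ((a : Int) * (b : Int)) ((pvGcdLoop a b : Nat) : Int)
        = (L : Int) := by
      rw [pvGcdLoop_eq_gcd]
      have : ((a : Int) * (b : Int)) = ((a * b : Nat) : Int) := by push_cast; ring
      rw [this, PySem.Int.floordiv_natCast]
      rfl
    rw [hper]
    have hLpos : 0 < L := Nat.pos_of_ne_zero (Nat.lcm_ne_zero
      (by simpa [hadef] using hp1) (by simpa [hbdef] using hp2))
    have hd1 : p1 ∣ (L : Int) := by
      rw [← Int.natAbs_dvd]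
      exact_mod_cast Nat.dvd_lcm_left a b
    have hd2 : p2 ∣ (L : Int) := by
      rw [← Int.natAbs_dvd]
      exact_mod_cast Nat.dvd_lcm_right a b
    have hq : ∀ i, (fun i => pvQ w1 p1 w2 p2 (Int.ofNat i)) (L + i)
        = (fun i => pvQ w1 p1 w2 p2 (Int.ofNat i)) i := by
      intro i
      simp only [Int.ofNat_eq_natCast]
      have : ((L + i : Nat) : Int) = (i : Int) + (L : Int) := by push_cast; ring
      rw [this]
      exact pvQ_period w1 p1 w2 p2 (L : Int) hd1 hd2 (i : Int)
    have hsplit := countP_period (fun i => pvQ w1 p1 w2 p2 (Int.ofNat i)) L hLpos hq tp.toNat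
    have htpn : ((tp.toNat : Nat) : Int) = tp := Int.toNat_of_nonneg (le_of_lt htp')
    by_cases hb : (L : Int) ≤ tp
    · rw [if_pos hb]
      rw [← htpn, PySem.Int.floordiv_natCast, PySem.Int.mod_natCast]
      rw [pvHits_eq_cnt, pvHits_eq_cnt, sweet_date_eq_cnt]
      rw [← hp1def, ← hp2def, htpn]
      simp only [Int.toNat_natCast]
      rw [show (pvCnt w1 p1 w2 p2 tp.toNat : Int)
          = ((tp.toNat / L * (List.range L).countP (fun i => pvQ w1 p1 w2 p2 (Int.ofNat i))
              + (List.range (tp.toNat % L)).countP (fun i => pvQ w1 p1 w2 p2 (Int.ofNat i)) : Nat) : Int)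
        from by rw [pvCnt, hsplit]]
      push_cast
      rfl
    · rw [if_neg hb]
      rw [pvHits_eq_cnt, sweet_date_eq_cnt, ← hp1def, ← hp2def]
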